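-- pv_equiv track=rewrite | github.com/josephsayegh/RIW | indexes.py | tuple_merge
-- ===== SOURCE A (Python) =====
-- def tuple_merge(tuples_list):
--     """
--     permet de fusioner une liste de paires (terme_id, doc_id)
--     en un dico de la forme {'terme': {doc_id: nb_occurence}}
--     """
--     postings = {}
--     for term_id, document_id in tuples_list:
--         try:
--             postings[term_id]
--         except KeyError:
--             postings[term_id] = {}
--         try:
--             postings[term_id][document_id] += 1
--         except KeyError:
--             postings[term_id][document_id] = 1
--     return postings
-- ===== SOURCE B (Python) =====
-- def tuple_merge(tuples_list):
--     """
--     permet de fusioner une liste de paires (terme_id, doc_id)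
--     en un dico de la forme {'terme': {doc_id: nb_occurence}}
--     """
--     # pass 1: flat table of pair frequencies, keyed by the (term_id, doc_id) tuple
--     counts = {}
--     for pair in tuples_list:
--         counts[pair] = counts.get(pair, 0) + 1
--     # pass 2: reshape the flat table into the nested postings dict
--     postings = {}
--     for (term_id, doc_id), n in counts.items():
--         if term_id not in postings:
--             postings[term_id] = {}
--         postings[term_id][doc_id] = n
--     return postings
-- ===== Notes on version B (the rewrite author's own statement) =====
-- stated objective: alternative
-- what changed: B replaces A's per-element nested try/except dict updates with two passes: it first builds one flat frequency table keyed by the (term_id, doc_id) tuple, then reshapes that table's items into the nested postings dict.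
import Mathlib
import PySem

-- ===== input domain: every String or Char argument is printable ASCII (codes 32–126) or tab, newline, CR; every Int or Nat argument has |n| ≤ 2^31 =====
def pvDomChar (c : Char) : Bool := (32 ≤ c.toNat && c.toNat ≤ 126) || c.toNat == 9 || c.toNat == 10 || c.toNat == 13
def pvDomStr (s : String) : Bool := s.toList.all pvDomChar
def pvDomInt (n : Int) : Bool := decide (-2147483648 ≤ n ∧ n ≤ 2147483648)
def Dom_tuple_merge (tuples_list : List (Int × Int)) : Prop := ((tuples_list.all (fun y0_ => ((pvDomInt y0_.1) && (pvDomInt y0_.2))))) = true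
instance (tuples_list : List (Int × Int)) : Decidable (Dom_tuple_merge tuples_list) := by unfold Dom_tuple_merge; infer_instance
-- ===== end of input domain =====

-- ===== PORT A =====
-- B changes the decomposition: one flat pair-frequency table first, then a reshape pass (objective: alternative).
-- Helper: A's loop body ('try postings[t]', then 'try postings[t][d] += 1 except: = 1'); the in-place mutation of the
-- inner dict is modelled by re-inserting at the (already present) key t, which keeps its position.
def pvStepA (P : PySem.Dict Int (PySem.Dict Int Int)) (p : Int × Int) :
    PySem.Dict Int (PySem.Dict Int Int) :=
  let P1 := match P.get? p.1 with
    | some _ => P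
    | none => P.insert p.1 PySem.Dict.empty
  let inner := P1.getD p.1 PySem.Dict.empty
  match inner.get? p.2 with
  | some v => P1.insert p.1 (inner.insert p.2 (v + 1))
  | none => P1.insert p.1 (inner.insert p.2 1)

def tuple_merge (tuples_list : List (Int × Int)) : List (Int × List (Int × Int)) :=
  ((tuples_list.foldl pvStepA PySem.Dict.empty).items).map (fun q => (q.1, q.2.items))

-- ===== PORT B =====
-- Helper: B's second-loop body ('if t not in postings: postings[t] = {}; postings[t][d] = n'),
-- again modelling the in-place inner-dict store by re-inserting at the present key t.
def pvStepB (P : PySem.Dict Int (PySem.Dict Int Int)) (e : (Int × Int) × Int) :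
    PySem.Dict Int (PySem.Dict Int Int) :=
  let P1 := if P.contains e.1.1 then P else P.insert e.1.1 PySem.Dict.empty
  P1.insert e.1.1 ((P1.getD e.1.1 PySem.Dict.empty).insert e.1.2 e.2)

def tuple_merge_alt (tuples_list : List (Int × Int)) : List (Int × List (Int × Int)) :=
  let counts := tuples_list.foldl (fun d p => d.insert p (d.getD p 0 + 1)) PySem.Dict.empty
  let postings := counts.items.foldl pvStepB PySem.Dict.empty
  postings.items.map (fun q => (q.1, q.2.items))

-- ===== PRECONDITION & SPEC =====
def Spec_tuple_merge (tuples_list : List (Int × Int)) (out : List (Int × List (Int × Int))) : Prop := out = tuple_merge_alt tuples_list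
instance (tuples_list : List (Int × Int)) (out : List (Int × List (Int × Int))) : Decidable (Spec_tuple_merge tuples_list out) := by unfold Spec_tuple_merge; infer_instance

-- ===== CLAIM (what is proved, stated in full; the proofs are below) =====
def Claim_equal_tuple_merge : Prop := ∀ (tuples_list : List (Int × Int)), Dom_tuple_merge tuples_list → Spec_tuple_merge tuples_list (tuple_merge tuples_list)

-- ===== LEMMAS AND PROOFS =====

-- Two inserts at distinct keys commute when the first key is already present (its slot is overwritten in place).
theorem tm_insert_comm_of_contains {κ ν : Type} [BEq κ] [LawfulBEq κ]
    (d : PySem.Dict κ ν) (k k' : κ) (v v' : ν) (hk : d.contains k = true) (hne : k' ≠ k) :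
    (d.insert k v).insert k' v' = (d.insert k' v').insert k v := by
  apply PySem.Dict.ext
  have hk2 : (d.insert k' v').contains k = true := by
    rw [PySem.Dict.contains_insert]; simp [hk]
  by_cases hk' : d.contains k' = true
  · have hk'2 : (d.insert k v).contains k' = true := by
      rw [PySem.Dict.contains_insert]; simp [hk']
    rw [PySem.Dict.items_insert_of_contains _ _ hk'2,
        PySem.Dict.items_insert_of_contains _ _ hk,
        PySem.Dict.items_insert_of_contains _ _ hk2,
        PySem.Dict.items_insert_of_contains _ _ hk',
        List.map_map, List.map_map]
    apply List.map_congr_left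
    intro p _
    by_cases h1 : p.1 = k <;> by_cases h2 : p.1 = k'
    · exact absurd (h1.symm.trans h2).symm hne
    · simp [h1, Ne.symm hne]
    · simp [h2, hne]
    · simp [h1, h2]
  · simp only [Bool.not_eq_true] at hk'
    have hk'2 : (d.insert k v).contains k' = false := by
      rw [PySem.Dict.contains_insert]; simp [hk', hne]
    rw [PySem.Dict.items_insert_of_not_contains _ _ hk'2,
        PySem.Dict.items_insert_of_contains _ _ hk,
        PySem.Dict.items_insert_of_contains _ _ hk2,
        PySem.Dict.items_insert_of_not_contains _ _ hk',
        List.map_append]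
    simp [hne]

-- Normal form of one B-step.
theorem tm_stepB_eq (P : PySem.Dict Int (PySem.Dict Int Int)) (e : (Int × Int) × Int) :
    pvStepB P e = P.insert e.1.1 ((P.getD e.1.1 PySem.Dict.empty).insert e.1.2 e.2) := by
  unfold pvStepB
  by_cases hc : P.contains e.1.1 = true
  · simp only [hc, if_true]
  · simp only [Bool.not_eq_true] at hc
    simp only [hc, if_false, Bool.false_eq_true,
      PySem.Dict.getD_insert_self, PySem.Dict.insert_insert_self,
      PySem.Dict.getD_of_not_contains _ _ hc]

-- Normal form of one A-step.
theorem tm_stepA_eq (P : PySem.Dict Int (PySem.Dict Int Int)) (p : Int × Int) :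
    pvStepA P p = P.insert p.1 ((P.getD p.1 PySem.Dict.empty).insert p.2
      ((((P.getD p.1 PySem.Dict.empty).get? p.2).getD 0) + 1)) := by
  unfold pvStepA
  cases hP : P.get? p.1 with
  | some inner =>
    simp only [PySem.Dict.getD_eq_get?_getD, hP, Option.getD_some]
    cases hI : inner.get? p.2 <;> simp
  | none =>
    simp only [PySem.Dict.getD_eq_get?_getD, hP, Option.getD_none,
      PySem.Dict.get?_insert_self, Option.getD_some,
      PySem.Dict.insert_insert_self]
    cases hI : (PySem.Dict.empty : PySem.Dict Int Int).get? p.2 <;>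
      simp_all [PySem.Dict.get?_empty]

-- What one B-step does to a nested lookup.
theorem tm_lookup_stepB (P : PySem.Dict Int (PySem.Dict Int Int)) (e : (Int × Int) × Int) (t d : Int) :
    ((pvStepB P e).getD t PySem.Dict.empty).get? d
      = if t = e.1.1 ∧ d = e.1.2 then some e.2 else ((P.getD t PySem.Dict.empty).get? d) := by
  rw [tm_stepB_eq, PySem.Dict.getD_insert]
  by_cases ht : t = e.1.1
  · subst ht
    rw [if_pos rfl, PySem.Dict.get?_insert]
    by_cases hd : d = e.1.2 <;> simp [hd]
  · simp [ht]

-- What one A-step does to a nested lookup.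
theorem tm_lookup_stepA (P : PySem.Dict Int (PySem.Dict Int Int)) (p : Int × Int) (t d : Int) :
    ((pvStepA P p).getD t PySem.Dict.empty).get? d
      = if t = p.1 ∧ d = p.2
        then some ((((P.getD p.1 PySem.Dict.empty).get? p.2).getD 0) + 1)
        else ((P.getD t PySem.Dict.empty).get? d) := by
  rw [tm_stepA_eq, PySem.Dict.getD_insert]
  by_cases ht : t = p.1
  · subst ht
    rw [if_pos rfl, PySem.Dict.get?_insert]
    by_cases hd : d = p.2 <;> simp [hd]
  · simp [ht]

-- Nested lookups in A's accumulated dict are exactly the pair counts.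
theorem tm_lookup_foldA (xs : List (Int × Int)) (t d : Int) :
    ((xs.foldl pvStepA PySem.Dict.empty).getD t PySem.Dict.empty).get? d
      = if (t, d) ∈ xs then some (xs.count (t, d) : Int) else none := by
  induction xs using List.reverseRecOn with
  | nil => simp [PySem.Dict.getD_empty, PySem.Dict.get?_empty]
  | append_singleton xs p ih =>
    rw [List.foldl_append, List.foldl_cons, List.foldl_nil, tm_lookup_stepA, ih]
    by_cases hp : (t, d) = p
    · obtain ⟨t0, d0⟩ := p
      obtain ⟨rfl, rfl⟩ := Prod.mk.injEq .. ▸ hp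
      rw [if_pos ⟨rfl, rfl⟩, ih]
      have hmm : (t, d) ∈ xs ++ [(t, d)] := List.mem_append.mpr (Or.inr (List.mem_singleton.mpr rfl))
      by_cases hm : (t, d) ∈ xs
      · rw [if_pos hm, if_pos hmm, List.count_append, List.count_singleton]
        simp only [Option.getD_some, beq_self_eq_true, if_true]
        push_cast
        ring_nf
      · rw [if_neg hm, if_pos hmm, List.count_append, List.count_singleton,
          List.count_eq_zero.mpr hm]
        simp
    · have hne : ¬ (t = p.1 ∧ d = p.2) := by
        intro ⟨h1, h2⟩; exact hp (by cases p; simp_all)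
      rw [if_neg hne]
      have hc : List.count (t, d) (xs ++ [p]) = List.count (t, d) xs := by
        rw [List.count_append, List.count_singleton, if_neg (by simp [Ne.symm hp]), Nat.add_zero]
      by_cases hm : (t, d) ∈ xs
      · rw [if_pos hm, if_pos (List.mem_append.mpr (Or.inl hm)), hc]
      · rw [if_neg hm, if_neg (by simp [hm, hp])]

-- A pair not seen before: one B-step carrying count 1 is exactly one A-step.
theorem tm_stepB_fresh (Q : PySem.Dict Int (PySem.Dict Int Int)) (p : Int × Int)
    (h : ((Q.getD p.1 PySem.Dict.empty).get? p.2) = none) :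
    pvStepB Q (p, 1) = pvStepA Q p := by
  rw [tm_stepB_eq, tm_stepA_eq, h]
  rfl

-- A pair seen before: bumping its stored count is exactly one extra A-step.
theorem tm_stepB_bump (Q : PySem.Dict Int (PySem.Dict Int Int)) (p : Int × Int) (c : Int) :
    pvStepB Q (p, c + 1) = pvStepA (pvStepB Q (p, c)) p := by
  rw [tm_stepB_eq, tm_stepB_eq, tm_stepA_eq,
    PySem.Dict.getD_insert_self, PySem.Dict.get?_insert_self,
    PySem.Dict.insert_insert_self, PySem.Dict.insert_insert_self]
  rfl

-- An A-step at a pair already stored in R commutes past a B-step at a different pair.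
theorem tm_stepA_stepB_comm (R : PySem.Dict Int (PySem.Dict Int Int)) (p : Int × Int)
    (e : (Int × Int) × Int) (v : Int) (hne : e.1 ≠ p)
    (h : ((R.getD p.1 PySem.Dict.empty).get? p.2) = some v) :
    pvStepB (pvStepA R p) e = pvStepA (pvStepB R e) p := by
  have hct : R.contains p.1 = true := by
    rw [PySem.Dict.contains_eq_isSome_get?]
    cases hR : R.get? p.1 with
    | some _ => rfl
    | none =>
      rw [PySem.Dict.getD_eq_get?_getD, hR, Option.getD_none, PySem.Dict.get?_empty] at h
      exact absurd h (by simp)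
  rw [tm_stepA_eq, tm_stepB_eq, tm_stepB_eq, tm_stepA_eq, h]
  by_cases ht : e.1.1 = p.1
  · have hd : e.1.2 ≠ p.2 := by
      intro hd; exact hne (Prod.ext ht hd)
    rw [ht, PySem.Dict.getD_insert_self, PySem.Dict.getD_insert_self,
      PySem.Dict.insert_insert_self, PySem.Dict.insert_insert_self,
      PySem.Dict.get?_insert_of_ne _ _ (Ne.symm hd), h]
    have hcd : (R.getD p.1 PySem.Dict.empty).contains p.2 = true := by
      rw [PySem.Dict.contains_eq_isSome_get?, h]; rfl
    simp only [Option.getD_some]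
    rw [tm_insert_comm_of_contains _ _ _ _ _ hcd hd]
  · rw [PySem.Dict.getD_insert_of_ne _ _ _ (Ne.symm ht), PySem.Dict.getD_insert_of_ne _ _ _ ht, h]
    simp only [Option.getD_some]
    rw [tm_insert_comm_of_contains _ _ _ _ _ hct ht]

-- … and past a whole B-fold over entries at different pairs.
theorem tm_stepA_foldB_comm (L : List ((Int × Int) × Int)) (R : PySem.Dict Int (PySem.Dict Int Int))
    (p : Int × Int) (hL : ∀ e ∈ L, e.1 ≠ p)
    (h : (((R.getD p.1 PySem.Dict.empty).get? p.2)).isSome = true) :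
    L.foldl pvStepB (pvStepA R p) = pvStepA (L.foldl pvStepB R) p := by
  induction L generalizing R with
  | nil => rfl
  | cons e L ih =>
    obtain ⟨v, hv⟩ := Option.isSome_iff_exists.mp h
    rw [List.foldl_cons, List.foldl_cons,
      tm_stepA_stepB_comm R p e v (hL e (List.mem_cons_self ..)) hv]
    apply ih _ (fun e' he' => hL e' (List.mem_cons_of_mem _ he'))
    rw [tm_lookup_stepB]
    rw [if_neg (by intro ⟨h1, h2⟩; exact hL e (List.mem_cons_self ..) (Prod.ext h1.symm h2.symm)), hv]
    rfl

-- Main lemma: A's one-pass nested dict equals B's reshape of the flat counter.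
theorem tm_main (xs : List (Int × Int)) :
    xs.foldl pvStepA PySem.Dict.empty
      = ((PySem.Set.ofList xs).map (fun k => (k, (xs.count k : Int)))).foldl pvStepB PySem.Dict.empty := by
  induction xs using List.reverseRecOn with
  | nil => rfl
  | append_singleton xs p ih =>
    rw [List.foldl_append, List.foldl_cons, List.foldl_nil, PySem.Set.ofList_append_singleton]
    have hcnt : ∀ k : Int × Int, k ≠ p →
        (((xs ++ [p]).count k : Int)) = ((xs.count k : Int)) := by
      intro k hk
      rw [List.count_append, List.count_singleton, if_neg (by simp [Ne.symm hk])]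
      simp
    have hcntp : (((xs ++ [p]).count p : Int)) = (xs.count p : Int) + 1 := by
      rw [List.count_append, List.count_singleton, if_pos (by simp)]
      push_cast; ring
    by_cases hp : p ∈ xs
    · -- p already seen: its counter slot is bumped in place
      have hpS : p ∈ PySem.Set.ofList xs := (PySem.Set.mem_ofList xs p).mpr hp
      rw [PySem.Set.add_of_mem hpS, ih]
      obtain ⟨S1, S2, hsplit⟩ := List.append_of_mem hpS
      have hnd := PySem.Set.nodup_ofList xs
      rw [hsplit] at hnd
      have hS1 : p ∉ S1 := fun hmem =>
        (List.disjoint_of_nodup_append hnd) hmem (List.mem_cons_self ..)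
      have hS2 : p ∉ S2 := (List.nodup_cons.mp (List.Nodup.of_append_right hnd)).1
      rw [hsplit]
      simp only [List.map_append, List.map_cons, List.foldl_append, List.foldl_cons]
      rw [List.map_congr_left (fun k (hk : k ∈ S1) =>
            congrArg (Prod.mk k) (hcnt k (fun h => hS1 (h ▸ hk)))),
          List.map_congr_left (fun k (hk : k ∈ S2) =>
            congrArg (Prod.mk k) (hcnt k (fun h => hS2 (h ▸ hk)))),
          congrArg (Prod.mk p) hcntp,
          tm_stepB_bump,
          tm_stepA_foldB_comm _ _ _
            (by rintro e he; simp only [List.mem_map] at he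
                obtain ⟨k, hk, rfl⟩ := he
                exact fun h => hS2 (h ▸ hk))
            (by rw [tm_lookup_stepB, if_pos ⟨rfl, rfl⟩]; rfl)]
    · -- p fresh: the counter appends (p, 1) and one B-step is one A-step
      have hpS : p ∉ PySem.Set.ofList xs := fun h => hp ((PySem.Set.mem_ofList xs p).mp h)
      have hc1 : (((xs ++ [p]).count p : Int)) = 1 := by
        rw [List.count_append, List.count_eq_zero.mpr hp, List.count_singleton, if_pos (by simp)]
        simp
      rw [PySem.Set.add_of_not_mem hpS, List.map_append, List.map_cons, List.map_nil,
          List.foldl_append, List.foldl_cons, List.foldl_nil,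
          List.map_congr_left (fun k (hk : k ∈ PySem.Set.ofList xs) =>
            congrArg (Prod.mk k) (hcnt k (fun h => hpS (h ▸ hk)))),
          congrArg (Prod.mk p) hc1, ← ih,
          tm_stepB_fresh _ _ (by
            rw [tm_lookup_foldA, if_neg (by simpa using hp)])]

-- ===== VERDICT (by name: the statement is the Claim_ definition above) =====
theorem tuple_merge_spec : Claim_equal_tuple_merge := by
  intro xs _
  unfold Spec_tuple_merge tuple_merge tuple_merge_alt
  simp only [PySem.Dict.foldl_insert_getD_add_one_eq_counter, PySem.Dict.items_counter, tm_main]
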